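-- pv_equiv track=rewrite | github.com/miliar/Code_Jam_Webscraper | Solutions_python/Problem_181/1333.py | solve
-- ===== SOURCE A (Python) =====
-- def solve(string):
--     chars = []
--
--     for char in string:
--         if "".join(chars)+char > char+"".join(chars):
--             chars.append(char)
--         else:
--             chars.insert(0, char)
--     return "".join(chars)
-- ===== SOURCE B (Python) =====
-- def solve(string):
--     front = []
--     back = []
--     hi = None
--     for c in string:
--         if hi is None or c >= hi:
--             front.append(c)
--             hi = c
--         else:
--             back.append(c)
--     return "".join(reversed(front)) + "".join(back)
-- ===== Notes on version B (the rewrite author's own statement) =====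
-- stated objective: faster
-- what changed: Replaces the per-step full-string comparison S+c > c+S and index-0 insertion with a single pass that partitions characters into a front list (when c is >= the running max) and a back list, combined once at the end by reversing front; no quadratic string concatenation per step.
import Mathlib
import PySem

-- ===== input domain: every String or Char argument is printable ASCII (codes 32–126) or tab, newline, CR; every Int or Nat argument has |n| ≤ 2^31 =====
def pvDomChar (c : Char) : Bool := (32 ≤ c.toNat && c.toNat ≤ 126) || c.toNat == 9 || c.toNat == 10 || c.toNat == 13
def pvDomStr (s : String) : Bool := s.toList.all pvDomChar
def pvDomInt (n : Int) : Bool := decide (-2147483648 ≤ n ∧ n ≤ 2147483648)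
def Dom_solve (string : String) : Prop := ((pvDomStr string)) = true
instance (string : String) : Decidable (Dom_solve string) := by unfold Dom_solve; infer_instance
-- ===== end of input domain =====

-- B partitions characters into front/back lists in one pass against a running max
-- and joins once at the end, instead of A's per-step full-string comparison and
-- index-0 insertion: a simpler single-pass decomposition.


-- ===== PORT A =====
-- Python str '>' is '<' flipped on the underlying List Char (code-point lexicographic; see PYSEM.md).
def solveLoop : List Char → List Char → List Char
  | chars, [] => chars
  | chars, c :: rest =>
    if c :: chars < chars ++ [c] then solveLoop (chars ++ [c]) rest
    else solveLoop (c :: chars) rest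

def solve (string : String) : String := String.mk (solveLoop [] string.toList)

-- ===== PORT B =====
def solveAltLoop : List Char → List Char → Option Char → List Char → List Char × List Char
  | front, back, _, [] => (front, back)
  | front, back, hi, c :: rest =>
    match hi with
    | none => solveAltLoop (front ++ [c]) back (some c) rest
    | some h =>
      if h ≤ c then solveAltLoop (front ++ [c]) back (some c) rest
      else solveAltLoop front (back ++ [c]) hi rest

def solve_alt (string : String) : String :=
  let p := solveAltLoop [] [] none string.toList
  String.mk (p.1.reverse ++ p.2)

-- ===== PRECONDITION & SPEC =====
def Spec_solve (string : String) (out : String) : Prop := out = solve_alt string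
instance (string : String) (out : String) : Decidable (Spec_solve string out) := by unfold Spec_solve; infer_instance

-- ===== CLAIM (what is proved, stated in full; the proofs are below) =====
def Claim_equal_solve : Prop := ∀ (string : String), Dom_solve string → Spec_solve string (solve string)

-- ===== LEMMAS AND PROOFS =====

-- Rotation sub-lemma: with every element of t bounded by h, h::t is never < t ++ [h].
theorem not_lt_rot (t : List Char) (h : Char) (hb : ∀ x ∈ t, x ≤ h) :
    ¬ (h :: t < t ++ [h]) := by
  induction t generalizing h with
  | nil => simp
  | cons a t' ih =>
    have ha : a ≤ h := hb a (by simp)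
    intro hlt
    rw [List.cons_append, List.cons_lt_cons_iff] at hlt
    rcases hlt with hlt | ⟨heq, hlt⟩
    · exact absurd hlt (not_lt.mpr ha)
    · subst heq
      exact ih h (fun x hx => hb x (by simp [hx])) hlt

-- A's append test on a max-headed accumulator is exactly 'c < head'.
theorem cond_iff (t : List Char) (h c : Char) (hb : ∀ x ∈ t, x ≤ h) :
    (c :: h :: t < (h :: t) ++ [c]) ↔ c < h := by
  constructor
  · intro hlt
    rw [List.cons_append, List.cons_lt_cons_iff] at hlt
    rcases hlt with hlt | ⟨heq, hlt⟩
    · exact hlt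
    · subst heq
      exact absurd hlt (not_lt_rot t c hb)
  · intro hch
    rw [List.cons_append, List.cons_lt_cons_iff]
    exact Or.inl hch

-- Main invariant: A's accumulator is h :: fr.reverse ++ back where B's state is
-- (fr ++ [h], back, some h) and h bounds everything seen so far.
theorem loop_eq (rest : List Char) : ∀ (fr back : List Char) (h : Char),
    (∀ x ∈ fr, x ≤ h) → (∀ x ∈ back, x ≤ h) →
    solveLoop (h :: (fr.reverse ++ back)) rest =
      (solveAltLoop (fr ++ [h]) back (some h) rest).1.reverse ++
        (solveAltLoop (fr ++ [h]) back (some h) rest).2 := by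
  induction rest with
  | nil => intro fr back h _ _; simp [solveLoop, solveAltLoop]
  | cons c rest ih =>
    intro fr back h hfr hback
    have hb : ∀ x ∈ fr.reverse ++ back, x ≤ h := by
      intro x hx
      rcases List.mem_append.mp hx with hx | hx
      · exact hfr x (List.mem_reverse.mp hx)
      · exact hback x hx
    rw [solveLoop, solveAltLoop]
    by_cases hch : c < h
    · rw [if_pos ((cond_iff _ h c hb).mpr hch), if_neg (not_le.mpr hch)]
      have : (h :: (fr.reverse ++ back)) ++ [c] = h :: (fr.reverse ++ (back ++ [c])) := by
        simp
      rw [this]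
      exact ih fr (back ++ [c]) h hfr (by
        intro x hx
        rcases List.mem_append.mp hx with hx | hx
        · exact hback x hx
        · simp at hx; subst hx; exact le_of_lt hch)
    · rw [if_neg (fun hlt => hch ((cond_iff _ h c hb).mp hlt)), if_pos (not_lt.mp hch)]
      have key := ih (fr ++ [h]) back c
        (by intro x hx
            rcases List.mem_append.mp hx with hx | hx
            · exact le_trans (hfr x hx) (not_lt.mp hch)
            · simp at hx; subst hx; exact not_lt.mp hch)
        (fun x hx => le_trans (hback x hx) (not_lt.mp hch))
      have : c :: ((fr ++ [h]).reverse ++ back) = c :: h :: (fr.reverse ++ back) := by simp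
      rw [this] at key
      exact key

-- ===== VERDICT (by name: the statement is the Claim_ definition above) =====
theorem solve_spec : Claim_equal_solve := by
  intro string _
  unfold Spec_solve solve solve_alt
  cases hs : string.toList with
  | nil => simp [solveLoop, solveAltLoop]
  | cons c rest =>
    rw [solveLoop, solveAltLoop]
    rw [if_neg (by simp)]
    have := loop_eq rest [] [] c (by simp) (by simp)
    simpa using congrArg String.mk this
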